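-- pv_equiv track=rewrite | github.com/can-gurkan/gridarians | utils.py | get_allowed_actions
-- ===== SOURCE A (Python) =====
-- def get_allowed_actions(configuration):
--     action_counts = {"N_UP": 0, "N_RIGHT": 0, "N_DOWN": 0, "N_LEFT": 0, "N_CW": 0, "N_CCW": 0}
--     for part in configuration:
--         if part[2] == 2:
--             if part[3] == 0:
--                 action_counts["N_UP"] += 1
--             elif part[3] == 1:
--                 action_counts["N_DOWN"] += 1
--             elif part[3] == 2:
--                 action_counts["N_LEFT"] += 1
--             elif part[3] == 3:
--                 action_counts["N_RIGHT"] += 1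
--         elif part[2] == 3:
--             if part[3] == 0:
--                 action_counts["N_CW"] += 1
--             elif part[3] == 1:
--                 action_counts["N_CCW"] += 1
--     return action_counts
-- ===== SOURCE B (Python) =====
-- def get_allowed_actions(configuration):
--     signatures = {"N_UP": (2, 0), "N_RIGHT": (2, 3), "N_DOWN": (2, 1),
--                   "N_LEFT": (2, 2), "N_CW": (3, 0), "N_CCW": (3, 1)}
--     return {name: sum(1 for part in configuration if (part[2], part[3]) == sig)
--             for name, sig in signatures.items()}
-- ===== Notes on version B (the rewrite author's own statement) =====
-- stated objective: idiomatic
-- what changed: Replaces the single pass with a nested if/elif cascade mutating a counter dict by a per-action signature table and a dict comprehension that counts each (part[2], part[3]) signature independently.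
import Mathlib
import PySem

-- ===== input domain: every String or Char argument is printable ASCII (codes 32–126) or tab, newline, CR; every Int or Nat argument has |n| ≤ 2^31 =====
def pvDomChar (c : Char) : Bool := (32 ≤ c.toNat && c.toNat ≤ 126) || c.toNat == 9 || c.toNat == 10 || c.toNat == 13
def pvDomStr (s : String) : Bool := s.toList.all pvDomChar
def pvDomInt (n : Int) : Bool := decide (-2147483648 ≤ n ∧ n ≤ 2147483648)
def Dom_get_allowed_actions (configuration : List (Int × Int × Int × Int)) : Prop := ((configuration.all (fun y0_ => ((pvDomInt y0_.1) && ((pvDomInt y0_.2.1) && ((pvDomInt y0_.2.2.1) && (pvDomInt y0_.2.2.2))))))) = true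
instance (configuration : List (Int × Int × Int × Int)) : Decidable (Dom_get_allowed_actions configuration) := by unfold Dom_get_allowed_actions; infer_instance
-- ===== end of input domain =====

-- B replaces A's if/elif cascade over a mutated counter dict by per-signature counting (idiomatic; same cost).


-- ===== PORT A =====
-- A's loop body: the nested if/elif cascade; `action_counts[k] += 1` is `insert k (getD k 0 + 1)` (key always present).
def gaaStep (d : PySem.Dict String Int) (part : Int × Int × Int × Int) : PySem.Dict String Int :=
  if part.2.2.1 = 2 then
    if part.2.2.2 = 0 then d.insert "N_UP" (d.getD "N_UP" 0 + 1)
    else if part.2.2.2 = 1 then d.insert "N_DOWN" (d.getD "N_DOWN" 0 + 1)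
    else if part.2.2.2 = 2 then d.insert "N_LEFT" (d.getD "N_LEFT" 0 + 1)
    else if part.2.2.2 = 3 then d.insert "N_RIGHT" (d.getD "N_RIGHT" 0 + 1)
    else d
  else if part.2.2.1 = 3 then
    if part.2.2.2 = 0 then d.insert "N_CW" (d.getD "N_CW" 0 + 1)
    else if part.2.2.2 = 1 then d.insert "N_CCW" (d.getD "N_CCW" 0 + 1)
    else d
  else d

def get_allowed_actions (configuration : List (Int × Int × Int × Int)) : List (String × Int) :=
  (configuration.foldl gaaStep
    (PySem.Dict.mk [("N_UP", 0), ("N_RIGHT", 0), ("N_DOWN", 0), ("N_LEFT", 0), ("N_CW", 0), ("N_CCW", 0)])).items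

-- ===== PORT B =====
-- number of parts whose (part[2], part[3]) equals the given signature
def gaaCnt (configuration : List (Int × Int × Int × Int)) (s2 s3 : Int) : Int :=
  (configuration.countP (fun p => p.2.2.1 == s2 && p.2.2.2 == s3) : Int)

def get_allowed_actions_alt (configuration : List (Int × Int × Int × Int)) : List (String × Int) :=
  [("N_UP", gaaCnt configuration 2 0), ("N_RIGHT", gaaCnt configuration 2 3),
   ("N_DOWN", gaaCnt configuration 2 1), ("N_LEFT", gaaCnt configuration 2 2),
   ("N_CW", gaaCnt configuration 3 0), ("N_CCW", gaaCnt configuration 3 1)]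

-- ===== PRECONDITION & SPEC =====
def Spec_get_allowed_actions (configuration : List (Int × Int × Int × Int)) (out : List (String × Int)) : Prop := out = get_allowed_actions_alt configuration
instance (configuration : List (Int × Int × Int × Int)) (out : List (String × Int)) : Decidable (Spec_get_allowed_actions configuration out) := by unfold Spec_get_allowed_actions; infer_instance

-- ===== CLAIM (what is proved, stated in full; the proofs are below) =====
def Claim_equal_get_allowed_actions : Prop := ∀ (configuration : List (Int × Int × Int × Int)), Dom_get_allowed_actions configuration → Spec_get_allowed_actions configuration (get_allowed_actions configuration)

-- ===== LEMMAS AND PROOFS =====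

theorem gaa_inv (cfg : List (Int × Int × Int × Int)) :
    ∀ (a b c d e f : Int),
    (cfg.foldl gaaStep
      (PySem.Dict.mk [("N_UP", a), ("N_RIGHT", b), ("N_DOWN", c), ("N_LEFT", d), ("N_CW", e), ("N_CCW", f)])).items =
    [("N_UP", a + gaaCnt cfg 2 0), ("N_RIGHT", b + gaaCnt cfg 2 3),
     ("N_DOWN", c + gaaCnt cfg 2 1), ("N_LEFT", d + gaaCnt cfg 2 2),
     ("N_CW", e + gaaCnt cfg 3 0), ("N_CCW", f + gaaCnt cfg 3 1)] := by
  induction cfg with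
  | nil => intro a b c d e f; simp [gaaCnt]
  | cons p tl ih =>
    intro a b c d e f
    simp only [List.foldl_cons, gaaStep]
    split_ifs with h1 h2 h3 h4 h5 h6 h7 h8 <;>
    first
      | exact (ih (a+1) b c d e f).trans (by simp [gaaCnt, *]; omega)
      | exact (ih a (b+1) c d e f).trans (by simp [gaaCnt, *]; omega)
      | exact (ih a b (c+1) d e f).trans (by simp [gaaCnt, *]; omega)
      | exact (ih a b c (d+1) e f).trans (by simp [gaaCnt, *]; omega)
      | exact (ih a b c d (e+1) f).trans (by simp [gaaCnt, *]; omega)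
      | exact (ih a b c d e (f+1)).trans (by simp [gaaCnt, *]; omega)
      | exact (ih a b c d e f).trans (by simp [gaaCnt, *])

theorem get_allowed_actions_spec : Claim_equal_get_allowed_actions := by
  intro cfg _
  show get_allowed_actions cfg = get_allowed_actions_alt cfg
  unfold get_allowed_actions get_allowed_actions_alt
  rw [gaa_inv]
  simp
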